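-- pv_equiv track=rewrite | github.com/Executedone/Chinese-FastSpeech2 | text_normalization.py | get_num_phones
-- ===== SOURCE A (Python) =====
-- NUM_DICT = {
--         '0': '零',
--         '1': '一',
--         '2': '二',
--         '3': '三',
--         '4': '四',
--         '5': '五',
--         '6': '六',
--         '7': '七',
--         '8': '八',
--         '9': '九',
--         '10': '十',
--         '100': '百',
--         '1000': '千',
--         '-': '，'
-- }
--
-- def get_num_phones(num):
--     phones = []
--     num_len = len(num)
--     if num_len == 2 and num[0] == '1':
--         phones.append(NUM_DICT['10'])
--         if num[1] != '0':
--             phones.append(NUM_DICT[num[1]])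
--     else:
--         for i, n in enumerate(num):
--             if num[i:] == '0' * (num_len - i) or num[:(i + 1)] == '0' * (i + 1):
--                 continue
--             else:
--                 if len(phones) > 0 and phones[-1] == '零' and n == '0':
--                     continue
--                 else:
--                     phones.append(NUM_DICT[n])
--             if n == '0':
--                 continue
--             if num_len - i == 4:
--                 phones.append(NUM_DICT['1000'])
--             elif num_len - i == 3:
--                 phones.append(NUM_DICT['100'])
--             elif num_len - i == 2:
--                 phones.append(NUM_DICT['10'])
--             else:
--                 pass
--     return phones
-- ===== SOURCE B (Python) =====
-- NUM_DICT = {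
--         '0': '零',
--         '1': '一',
--         '2': '二',
--         '3': '三',
--         '4': '四',
--         '5': '五',
--         '6': '六',
--         '7': '七',
--         '8': '八',
--         '9': '九',
--         '10': '十',
--         '100': '百',
--         '1000': '千',
--         '-': '，'
-- }
--
-- def get_num_phones(num):
--     if len(num) == 2 and num[0] == '1':
--         return ['十'] if num[1] == '0' else ['十', NUM_DICT[num[1]]]
--     core = num.strip('0')          # digits between the first and last non-'0' characters
--     phones = []
--     prev_zero = False
--     place = len(num.lstrip('0'))   # place value (digits remaining incl. current) of the next char
--     for c in core:
--         if c == '0':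
--             if not prev_zero:
--                 phones.append('零')
--             prev_zero = True
--         else:
--             phones.append(NUM_DICT[c])
--             if place == 4:
--                 phones.append('千')
--             elif place == 3:
--                 phones.append('百')
--             elif place == 2:
--                 phones.append('十')
--             prev_zero = False
--         place -= 1
--     return phones
-- ===== Notes on version B (the rewrite author's own statement) =====
-- stated objective: faster
-- what changed: B strips leading/trailing zeros once (str.strip/lstrip) and then walks the remaining characters with a previous-was-zero flag and a decrementing place counter, instead of A's per-index comparison of two freshly built slices against an all-zero string of matching length and inspection of the output list's last element.
-- outside the precondition, e.g. on get_num_phones('7a'): A raises KeyError, B raises KeyError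
import Mathlib
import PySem

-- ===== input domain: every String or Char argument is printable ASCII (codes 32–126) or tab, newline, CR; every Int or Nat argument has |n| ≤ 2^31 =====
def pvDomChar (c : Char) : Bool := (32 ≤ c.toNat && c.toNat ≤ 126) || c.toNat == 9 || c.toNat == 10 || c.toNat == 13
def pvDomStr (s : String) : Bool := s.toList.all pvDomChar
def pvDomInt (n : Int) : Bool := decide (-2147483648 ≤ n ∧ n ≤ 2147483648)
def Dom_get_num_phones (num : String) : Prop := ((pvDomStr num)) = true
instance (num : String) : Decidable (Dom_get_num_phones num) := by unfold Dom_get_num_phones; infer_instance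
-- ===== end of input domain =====

-- B strips leading/trailing zeros once and then does a single flagged scan, instead of A's per-index slice comparisons (objective: avoid building two fresh slices at every index; speed not measured here).

-- ===== PORT A =====
-- NUM_DICT lookup for one character, ported by hand as a case chain (exact on the keys
-- Pre_ admits; Python raises KeyError on other keys, which Pre_ excludes — "" is never used there).
def pyNumDict (c : Char) : String :=
  if c = '0' then "零" else if c = '1' then "一" else if c = '2' then "二"
  else if c = '3' then "三" else if c = '4' then "四" else if c = '5' then "五"
  else if c = '6' then "六" else if c = '7' then "七" else if c = '8' then "八"
  else if c = '9' then "九" else if c = '-' then "，" else ""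

-- the body of A's for-loop (phones is the accumulator; p = (i, n) from enumerate)
def stepA (cs : List Char) (phones : List String) (i : Int) (n : Char) : List String :=
  if PySem.List.slice cs (some i) none = List.replicate ((cs.length : Int) - i).toNat '0' ∨
     PySem.List.slice cs none (some (i + 1)) = List.replicate (i + 1).toNat '0' then
    phones
  else if 0 < phones.length ∧ PySem.List.pyGet? phones (-1) = some "零" ∧ n = '0' then
    phones
  else
    let phones := phones ++ [pyNumDict n]
    if n = '0' then phones
    else if (cs.length : Int) - i = 4 then phones ++ ["千"]
    else if (cs.length : Int) - i = 3 then phones ++ ["百"]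
    else if (cs.length : Int) - i = 2 then phones ++ ["十"]
    else phones

def get_num_phones (num : String) : List String :=
  let cs := num.toList
  if cs.length = 2 ∧ PySem.List.pyGet? cs 0 = some '1' then
    let phones := ["十"]
    if PySem.List.pyGet? cs 1 ≠ some '0' then
      phones ++ [pyNumDict ((PySem.List.pyGet? cs 1).getD ' ')]
    else phones
  else
    (PySem.List.enumerate cs).foldl (fun phones p => stepA cs phones p.1 p.2) []

-- ===== PORT B =====
-- the body of B's for-loop: state = (phones, prev_zero, place)
def stepB (st : List String × Bool × Nat) (c : Char) : List String × Bool × Nat :=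
  if c = '0' then
    ((if st.2.1 then st.1 else st.1 ++ ["零"]), true, st.2.2 - 1)
  else
    let phones := st.1 ++ [pyNumDict c]
    let phones := if st.2.2 = 4 then phones ++ ["千"]
                  else if st.2.2 = 3 then phones ++ ["百"]
                  else if st.2.2 = 2 then phones ++ ["十"]
                  else phones
    (phones, false, st.2.2 - 1)

def get_num_phones_alt (num : String) : List String :=
  let cs := num.toList
  if cs.length = 2 ∧ PySem.List.pyGet? cs 0 = some '1' then
    if PySem.List.pyGet? cs 1 = some '0' then ["十"]
    else ["十", pyNumDict ((PySem.List.pyGet? cs 1).getD ' ')]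
  else
    -- num.strip('0') / num.lstrip('0'), ported by hand as dropWhile from both ends (exact)
    let core := ((cs.dropWhile (· == '0')).reverse.dropWhile (· == '0')).reverse
    let place0 := (cs.dropWhile (· == '0')).length
    (core.foldl stepB ([], false, place0)).1

-- ===== PRECONDITION & SPEC =====
-- Pre_ excludes exactly the strings containing a character that is not a NUM_DICT key
-- (anything outside 0-9 and '-'): on every such string Python A raises KeyError.
def Pre_get_num_phones (num : String) : Prop :=
  (num.toList.all (fun c => "0123456789-".toList.contains c)) = true
instance (num : String) : Decidable (Pre_get_num_phones num) := by
  unfold Pre_get_num_phones; infer_instance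
def pvWitness_get_num_phones : String := "2022"

def Spec_get_num_phones (num : String) (out : List String) : Prop := out = get_num_phones_alt num
instance (num : String) (out : List String) : Decidable (Spec_get_num_phones num out) := by unfold Spec_get_num_phones; infer_instance

-- ===== CLAIM (what is proved, stated in full; the proofs are below) =====
def Claim_equal_get_num_phones : Prop := ∀ (num : String), Dom_get_num_phones num → Pre_get_num_phones num → Spec_get_num_phones num (get_num_phones num)


-- ===== LEMMAS AND PROOFS =====

-- the skip condition of A's loop at (Nat) index m
def ASkip (cs : List Char) (m : Nat) : Prop :=
  PySem.List.slice cs (some (m : Int)) none = List.replicate ((cs.length : Int) - (m : Int)).toNat '0' ∨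
  PySem.List.slice cs none (some ((m : Int) + 1)) = List.replicate ((m : Int) + 1).toNat '0'

lemma stepA_of_skip (cs : List Char) (s : List String) (m : Nat) (c : Char)
    (h : ASkip cs m) : stepA cs s (m : Int) c = s := by
  unfold ASkip at h
  unfold stepA
  rw [if_pos h]

lemma foldl_skip (cs : List Char) (l : List (Int × Char)) (s : List String)
    (h : ∀ p ∈ l, ∀ s', stepA cs s' p.1 p.2 = s') :
    l.foldl (fun phones p => stepA cs phones p.1 p.2) s = s := by
  induction l generalizing s with
  | nil => rfl
  | cons a t ih =>
      rw [List.foldl_cons]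
      rw [h a (List.mem_cons_self)]
      exact ih s (fun p hp s' => h p (List.mem_cons_of_mem _ hp) s')

lemma pyNumDict_eq_zero_iff (c : Char) : pyNumDict c = "零" ↔ c = '0' := by
  constructor
  · intro h
    by_contra hc
    unfold pyNumDict at h
    rw [if_neg hc] at h
    split_ifs at h <;> exact absurd h (by decide)
  · intro h; subst h; decide

lemma dedupA_iff (phones : List String) :
    (0 < phones.length ∧ PySem.List.pyGet? phones (-1) = some "零") ↔
      phones.getLast? = some "零" := by
  rw [PySem.List.pyGet?_neg_one]
  constructor
  · exact fun h => h.2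
  · intro h
    refine ⟨?_, h⟩
    cases phones with
    | nil => simp at h
    | cons a t => simp

-- A's step, at a non-skipped index, rephrased with Nat arithmetic and getLast?
lemma stepA_eval (cs : List Char) (s : List String) (m : Nat) (c : Char) (h : ¬ ASkip cs m) :
    stepA cs s (m : Int) c =
      if s.getLast? = some "零" ∧ c = '0' then s
      else if c = '0' then s ++ [pyNumDict c]
      else if cs.length - m = 4 then s ++ [pyNumDict c] ++ ["千"]
      else if cs.length - m = 3 then s ++ [pyNumDict c] ++ ["百"]
      else if cs.length - m = 2 then s ++ [pyNumDict c] ++ ["十"]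
      else s ++ [pyNumDict c] := by
  unfold ASkip at h
  unfold stepA
  rw [if_neg h]
  dsimp only
  by_cases hd : s.getLast? = some "零" ∧ c = '0'
  · rw [if_pos ⟨((dedupA_iff s).mpr hd.1).1, ((dedupA_iff s).mpr hd.1).2, hd.2⟩, if_pos hd]
  · rw [if_neg (fun hcon => hd ⟨(dedupA_iff s).mp ⟨hcon.1, hcon.2.1⟩, hcon.2.2⟩), if_neg hd]
    by_cases hc : c = '0'
    · rw [if_pos hc, if_pos hc]
    · rw [if_neg hc, if_neg hc]
      have e4 : ((cs.length : Int) - (m : Int) = 4) ↔ (cs.length - m = 4) := by omega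
      have e3 : ((cs.length : Int) - (m : Int) = 3) ↔ (cs.length - m = 3) := by omega
      have e2 : ((cs.length : Int) - (m : Int) = 2) ↔ (cs.length - m = 2) := by omega
      simp only [e4, e3, e2]

lemma stepB_zero (phones : List String) (pz : Bool) (place : Nat) :
    stepB (phones, pz, place) '0' =
      ((if pz then phones else phones ++ ["零"]), true, place - 1) := by
  unfold stepB
  rw [if_pos rfl]

lemma stepB_nonzero (phones : List String) (pz : Bool) (place : Nat) (c : Char) (hc : c ≠ '0') :
    stepB (phones, pz, place) c =
      ((if place = 4 then phones ++ [pyNumDict c] ++ ["千"]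
        else if place = 3 then phones ++ [pyNumDict c] ++ ["百"]
        else if place = 2 then phones ++ [pyNumDict c] ++ ["十"]
        else phones ++ [pyNumDict c]), false, place - 1) := by
  unfold stepB
  rw [if_neg hc]

lemma head?_dropWhile_false (p : Char → Bool) (l : List Char) (x : Char)
    (h : (l.dropWhile p).head? = some x) : p x = false := by
  induction l with
  | nil => simp at h
  | cons a t ih =>
      rw [List.dropWhile_cons] at h
      split at h
      · exact ih h
      · next hpa => simp_all

-- A's loop and B's loop agree step for step on the middle stretch (no index skipped),
-- with the invariant: B's prev_zero flag ↔ the last phone so far is "零".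
lemma mid (cs : List Char) (core' : List Char) :
    ∀ (i0 : Nat) (phones : List String) (pz : Bool),
    (pz = true ↔ phones.getLast? = some "零") →
    (∀ k, k < core'.length → ¬ ASkip cs (i0 + k)) →
    (PySem.List.enumerate core' (i0 : Int)).foldl (fun s p => stepA cs s p.1 p.2) phones =
        (core'.foldl stepB (phones, pz, cs.length - i0)).1 ∧
    (((core'.foldl stepB (phones, pz, cs.length - i0)).2.1 = true) ↔
      ((core'.foldl stepB (phones, pz, cs.length - i0)).1.getLast? = some "零")) := by
  induction core' with
  | nil => intro i0 phones pz hpz _; exact ⟨rfl, hpz⟩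
  | cons c rest ih =>
    intro i0 phones pz hpz hns
    have hskip : ¬ ASkip cs i0 := by simpa using hns 0 (by simp)
    have hns' : ∀ k, k < rest.length → ¬ ASkip cs ((i0 + 1) + k) := by
      intro k hk
      have h1 := hns (k + 1) (by simp; omega)
      have h2 : i0 + (k + 1) = (i0 + 1) + k := by omega
      rwa [h2] at h1
    rw [PySem.List.enumerate_cons, List.foldl_cons, List.foldl_cons]
    dsimp only
    rw [stepA_eval cs phones i0 c hskip]
    have hcast : ((i0 : Int) + 1) = ((i0 + 1 : Nat) : Int) := by push_cast; ring
    rw [hcast]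
    have hplace : cs.length - i0 - 1 = cs.length - (i0 + 1) := by omega
    by_cases hc : c = '0'
    · subst hc
      rw [stepB_zero]
      by_cases hz : pz = true
      · have hl : phones.getLast? = some "零" := hpz.mp hz
        rw [if_pos ⟨hl, rfl⟩, if_pos hz, hplace]
        exact ih (i0 + 1) phones true (by simp [hl]) hns'
      · have hz' : pz = false := by cases pz; rfl; exact absurd rfl hz
        have hl : ¬ phones.getLast? = some "零" := fun h => hz (hpz.mpr h)
        rw [if_neg (fun h => hl h.1), if_pos rfl, hz', if_neg (by simp), hplace]
        have hinv : (true = true ↔ (phones ++ ["零"]).getLast? = some "零") := by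
          simp
        exact ih (i0 + 1) (phones ++ ["零"]) true hinv hns'
    · have hnd : pyNumDict c ≠ "零" := fun h => hc ((pyNumDict_eq_zero_iff c).mp h)
      rw [stepB_nonzero phones pz (cs.length - i0) c hc]
      rw [if_neg (fun h => hc h.2), if_neg hc, hplace]
      have hq : ∀ (w : String), w ≠ "零" → ∀ ph : List String,
          (false = true ↔ (ph ++ [w]).getLast? = some "零") := by
        intro w hw ph
        simp [hw]
      split_ifs with h4 h3 h2
      · exact ih (i0 + 1) _ false (hq "千" (by decide) _) hns'
      · exact ih (i0 + 1) _ false (hq "百" (by decide) _) hns'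
      · exact ih (i0 + 1) _ false (hq "十" (by decide) _) hns'
      · exact ih (i0 + 1) _ false (hq (pyNumDict c) hnd _) hns'

-- the main (non-special-case) branch: A's skip/scan loop equals B's strip-then-scan loop
lemma main_eq (cs : List Char) :
    (PySem.List.enumerate cs).foldl (fun s p => stepA cs s p.1 p.2) [] =
      ((((cs.dropWhile (· == '0')).reverse.dropWhile (· == '0')).reverse).foldl stepB
        ([], false, (cs.dropWhile (· == '0')).length)).1 := by
  set Z := cs.takeWhile (· == '0') with hZdef
  set t := cs.dropWhile (· == '0') with htdef
  set core := (t.reverse.dropWhile (· == '0')).reverse with hcoredef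
  set T := (t.reverse.takeWhile (· == '0')).reverse with hTdef
  have ht : t = core ++ T := by
    have h1 : t.reverse.takeWhile (· == '0') ++ t.reverse.dropWhile (· == '0') = t.reverse :=
      List.takeWhile_append_dropWhile
    calc t = t.reverse.reverse := (List.reverse_reverse t).symm
    _ = (t.reverse.takeWhile (· == '0') ++ t.reverse.dropWhile (· == '0')).reverse := by rw [h1]
    _ = core ++ T := by rw [List.reverse_append]
  have hcs : cs = Z ++ core ++ T := by
    have h0 := List.takeWhile_append_dropWhile (p := (· == '0')) (l := cs)
    rw [← hZdef, ← htdef] at h0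
    rw [← h0, ht, List.append_assoc]
  have hZ0 : ∀ c ∈ Z, c = '0' := by
    intro c hc
    have := List.mem_takeWhile_imp hc
    simpa using this
  have hT0 : ∀ c ∈ T, c = '0' := by
    intro c hc
    rw [hTdef, List.mem_reverse] at hc
    have := List.mem_takeWhile_imp hc
    simpa using this
  have hlenZ : Z.length ≤ cs.length := List.IsPrefix.length_le (List.takeWhile_prefix _)
  have hlen : cs.length = Z.length + core.length + T.length := by
    conv_lhs => rw [hcs]
    simp
    omega
  have hplace0 : t.length = cs.length - Z.length := by
    have : cs.length = Z.length + t.length := by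
      conv_lhs => rw [← List.takeWhile_append_dropWhile (p := (· == '0')) (l := cs)]
      simp [← hZdef, ← htdef]
    omega
  -- head of core (if any) is not '0'
  have hhead0 : ∀ x, core.head? = some x → (x == '0') = false := by
    intro x hx
    have hxt : t.head? = some x := by
      rw [ht]
      rcases core with _ | ⟨a, b⟩
      · simp at hx
      · simpa using hx
    rw [htdef] at hxt
    exact head?_dropWhile_false _ cs x hxt
  -- last of core (if any) is not '0'
  have hlast0 : ∀ x, core.getLast? = some x → (x == '0') = false := by
    intro x hx
    have h1 : core.reverse.head? = some x := by rw [List.head?_reverse]; exact hx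
    have h2 : core.reverse = t.reverse.dropWhile (· == '0') := by
      rw [hcoredef, List.reverse_reverse]
    rw [h2] at h1
    exact head?_dropWhile_false _ _ x h1
  -- prefix indices are skipped (the prefix of cs up to them is all '0')
  have hskipZ : ∀ k, k < Z.length → ASkip cs k := by
    intro k hk
    right
    have hc1 : ((k : Int) + 1) = ((k + 1 : Nat) : Int) := by push_cast; ring
    rw [hc1, PySem.List.slice_to_natCast, Int.toNat_natCast, List.eq_replicate_iff]
    constructor
    · rw [List.length_take]; omega
    · intro b hb
      refine hZ0 b ?_
      have htk : cs.take (k + 1) = Z.take (k + 1) := by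
        conv_lhs => rw [hcs, List.append_assoc]
        exact List.take_append_of_le_length (by omega)
      rw [htk] at hb
      exact List.mem_of_mem_take hb
  -- suffix indices are skipped (the rest of cs from them on is all '0')
  have hskipT : ∀ k, k < T.length → ASkip cs (Z.length + core.length + k) := by
    intro k hk
    left
    rw [PySem.List.slice_from_natCast]
    have hdrop : cs.drop (Z.length + core.length + k) = T.drop k := by
      conv_lhs => rw [hcs]
      have h1 : Z.length + core.length + k = (Z ++ core).length + k := by simp
      rw [List.append_assoc, ← List.append_assoc, h1, List.drop_length_add_append]
    have hcnt : ((cs.length : Int) - ((Z.length + core.length + k : Nat) : Int)).toNat = T.length - k := by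
      omega
    rw [hdrop, hcnt, List.eq_replicate_iff]
    constructor
    · rw [List.length_drop]
    · intro b hb
      exact hT0 b (List.mem_of_mem_drop hb)
  -- middle indices are never skipped
  have hns : ∀ k, k < core.length → ¬ ASkip cs (Z.length + k) := by
    intro k hk hsk
    have hne : core ≠ [] := by intro he; rw [he] at hk; simp at hk
    rcases hsk with hsk | hsk
    · rw [PySem.List.slice_from_natCast] at hsk
      have hdrop : cs.drop (Z.length + k) = core.drop k ++ T := by
        conv_lhs => rw [hcs]
        rw [List.append_assoc, List.drop_length_add_append,
          List.drop_append_of_le_length (by omega)]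
      cases hgl : core.getLast? with
      | none => rw [List.getLast?_eq_none_iff] at hgl; exact hne hgl
      | some x =>
        obtain ⟨ys, hys⟩ := List.getLast?_eq_some_iff.mp hgl
        have hx0 := hlast0 x hgl
        have hklen : k ≤ ys.length := by
          have := hk
          rw [hys] at this
          simp at this
          omega
        have hmem : x ∈ cs.drop (Z.length + k) := by
          rw [hdrop]
          apply List.mem_append_left
          rw [hys, List.drop_append_of_le_length hklen]
          exact List.mem_append_right _ (by simp)
        rw [hsk] at hmem
        have := List.eq_of_mem_replicate hmem
        rw [this] at hx0
        simp at hx0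
    · have hc1 : ((Z.length + k : Nat) : Int) + 1 = ((Z.length + k + 1 : Nat) : Int) := by
        push_cast; ring
      rw [hc1, PySem.List.slice_to_natCast] at hsk
      rcases hcore : core with _ | ⟨h0, rest2⟩
      · exact hne hcore
      · have h00 := hhead0 h0 (by rw [hcore]; rfl)
        have hmem : h0 ∈ cs.take (Z.length + k + 1) := by
          have htake : cs.take (Z.length + k + 1) = Z ++ (core ++ T).take (k + 1) := by
            conv_lhs => rw [hcs, List.append_assoc]
            have h1 : Z.length + k + 1 = Z.length + (k + 1) := by omega
            rw [h1, List.take_length_add_append]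
          rw [htake, hcore]
          apply List.mem_append_right
          simp
        rw [hsk] at hmem
        have := List.eq_of_mem_replicate hmem
        rw [this] at h00
        simp at h00
  -- assemble: split A's enumerate over Z ++ core ++ T
  have henum : PySem.List.enumerate cs =
      PySem.List.enumerate Z 0 ++ PySem.List.enumerate core ((Z.length : Nat) : Int) ++
        PySem.List.enumerate T ((Z.length + core.length : Nat) : Int) := by
    conv_lhs => rw [hcs]
    rw [PySem.List.enumerate_append, PySem.List.enumerate_append]
    have e1 : (0 : Int) + (Z.length : Int) = (Z.length : Int) := by ring
    have e2 : (0 : Int) + ((Z ++ core).length : Int) = ((Z.length + core.length : Nat) : Int) := by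
      push_cast [List.length_append]; ring
    rw [e1, e2]
  rw [henum, List.foldl_append, List.foldl_append]
  -- fold over Z is the identity
  have hZfold : (PySem.List.enumerate Z 0).foldl
      (fun s p => stepA cs s p.1 p.2) ([] : List String) = [] := by
    apply foldl_skip
    intro p hp s'
    rw [PySem.List.mem_enumerate_iff] at hp
    rcases hp with ⟨k, hk, rfl⟩
    dsimp only
    have hz : ((0 : Int) + (k : Nat)) = ((k : Nat) : Int) := by ring
    rw [hz]
    exact stepA_of_skip cs s' k _ (hskipZ k hk)
  rw [hZfold]
  -- middle fold: A ≡ B with the flag invariant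
  have hmid := mid cs core Z.length ([] : List String) false (by simp) hns
  rw [hmid.1, hplace0]
  -- fold over T is the identity
  apply foldl_skip
  intro p hp s'
  rw [PySem.List.mem_enumerate_iff] at hp
  rcases hp with ⟨k, hk, rfl⟩
  dsimp only
  have hz : (((Z.length + core.length : Nat) : Int) + (k : Nat)) =
      ((Z.length + core.length + k : Nat) : Int) := by push_cast; ring
  rw [hz]
  exact stepA_of_skip cs s' _ _ (hskipT k hk)

-- ===== VERDICT (by name: the statement is the Claim_ definition above) =====
theorem get_num_phones_spec : Claim_equal_get_num_phones := by
  intro num _ _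
  unfold Spec_get_num_phones get_num_phones get_num_phones_alt
  by_cases h : (num.toList.length = 2 ∧ PySem.List.pyGet? num.toList 0 = some '1')
  · rw [if_pos h, if_pos h]
    by_cases h0 : PySem.List.pyGet? num.toList 1 = some '0'
    · rw [if_pos h0, if_neg (by simpa using h0)]
    · rw [if_neg h0, if_pos h0]
      rfl
  · rw [if_neg h, if_neg h]
    exact main_eq num.toList
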